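-- pv_equiv track=rewrite | github.com/AslanZ-5/some-code | codewars/kata.py | solution
-- ===== SOURCE A (Python) =====
-- def solution(string, markers):
--     t = []
--     ls = string.split('\n')
--
--     for i in ls:
--         inx = []
--         for j in markers:
--             if j in i:
--                 inx.append(i.index(j))
--
--         if inx:
--             t.append(i[:min(inx)])
--         else:
--             t.append(i)
--     return '\n'.join(map(str.rstrip, t))
-- ===== SOURCE B (Python) =====
-- def solution(string, markers):
--     out = []
--     for line in string.split('\n'):
--         cut = len(line)
--         for k in range(len(line) + 1):
--             if any(line.startswith(m, k) for m in markers):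
--                 cut = k
--                 break
--         out.append(line[:cut].rstrip())
--     return '\n'.join(out)
-- ===== Notes on version B (the rewrite author's own statement) =====
-- stated objective: alternative
-- what changed: Instead of computing each marker's first occurrence with 'in'/index and taking the min over markers, B scans each line's positions left to right once and cuts at the first position where any marker starts (startswith with offset), stopping at the earliest match instead of scanning every marker over the whole line.
import Mathlib
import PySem

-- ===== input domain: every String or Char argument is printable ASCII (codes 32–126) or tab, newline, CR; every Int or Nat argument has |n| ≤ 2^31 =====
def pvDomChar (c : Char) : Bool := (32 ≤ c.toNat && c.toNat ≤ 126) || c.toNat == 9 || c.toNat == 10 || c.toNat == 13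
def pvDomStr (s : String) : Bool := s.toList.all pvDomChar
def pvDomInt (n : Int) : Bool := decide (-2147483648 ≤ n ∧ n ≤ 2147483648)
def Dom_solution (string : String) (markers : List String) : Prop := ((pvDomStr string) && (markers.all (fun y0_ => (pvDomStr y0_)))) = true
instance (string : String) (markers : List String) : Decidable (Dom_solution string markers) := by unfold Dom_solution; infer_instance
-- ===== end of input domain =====

-- B replaces A's per-marker first-occurrence-plus-min scan of each line by a single left-to-right
-- scan of the line's positions, cutting at the first position where any marker starts (objective: alternative).

-- ===== PORT A =====
def solution (string : String) (markers : List String) : String :=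
  let ls := (PySem.Str.split? string "\n").getD []   -- s.split('\n'): sep ≠ "", so split? is always `some`
  let t := ls.foldl (fun t i =>
    let inx := markers.foldl (fun inx j =>
      if PySem.Str.isIn j i then inx ++ [PySem.Str.find i j] else inx) []
    -- `if inx: t.append(i[:min(inx)]) else: t.append(i)` — min? is `some` exactly when inx ≠ []
    let cur := match PySem.List.min? inx (fun v => v) with
      | some v => PySem.Str.slice i none (some v)
      | none   => i
    t ++ [cur]) []
  PySem.Str.join "\n" (t.map PySem.Str.rstrip)

-- ===== PORT B =====
-- the inner `for k in range(len(line)+1): if any(line.startswith(m, k) for m in markers): cut = k; break`,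
-- as structural recursion on the suffix starting at position k (Python's startswith(m, k) with
-- 0 ≤ k ≤ len(line) is exactly `startswith` of `drop k`); when no position matches it returns
-- len(line), exactly B's untouched `cut = len(line)` default
def cutIdx (markers : List String) : List Char → Nat
  | [] => if markers.any (fun m => PySem.Chars.startswith [] m.toList) then 0 else 0
  | c :: rest =>
    if markers.any (fun m => PySem.Chars.startswith (c :: rest) m.toList) then 0
    else cutIdx markers rest + 1

def solution_alt (string : String) (markers : List String) : String :=
  let out := ((PySem.Str.split? string "\n").getD []).foldl (fun out line =>
    -- line[:cut] with 0 ≤ cut ≤ len(line) is List.take cut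
    out ++ [PySem.Str.rstrip (String.ofList (line.toList.take (cutIdx markers line.toList)))]) []
  PySem.Str.join "\n" out

-- ===== PRECONDITION & SPEC =====
def Spec_solution (string : String) (markers : List String) (out : String) : Prop := out = solution_alt string markers
instance (string : String) (markers : List String) (out : String) : Decidable (Spec_solution string markers out) := by unfold Spec_solution; infer_instance

-- ===== CLAIM (what is proved, stated in full; the proofs are below) =====
def Claim_equal_solution : Prop := ∀ (string : String) (markers : List String), Dom_solution string markers → Spec_solution string markers (solution string markers)

-- ===== LEMMAS AND PROOFS =====

-- no position strictly before cutIdx is the start of a marker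
lemma cutIdx_min (ms : List String) (cs : List Char) :
    ∀ k, k < cutIdx ms cs → ∀ m ∈ ms, ¬ m.toList <+: cs.drop k := by
  induction cs with
  | nil => intro k hk; simp [cutIdx] at hk
  | cons c rest ih =>
    intro k hk m hm hpre
    by_cases hmatch : (ms.any fun m => PySem.Chars.startswith (c :: rest) m.toList) = true
    · rw [cutIdx, if_pos hmatch] at hk; omega
    · rw [cutIdx, if_neg hmatch] at hk
      match k with
      | 0 =>
        exact hmatch (List.any_eq_true.2
          ⟨m, hm, (PySem.Chars.startswith_iff _ _).2 (by simpa using hpre)⟩)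
      | k' + 1 =>
        exact ih k' (by omega) m hm (by simpa using hpre)

-- if some marker occurs in cs at all, some marker starts exactly at cutIdx
lemma cutIdx_match (ms : List String) (cs : List Char)
    (h : ∃ m ∈ ms, m.toList <:+: cs) :
    ∃ m ∈ ms, m.toList <+: cs.drop (cutIdx ms cs) := by
  induction cs with
  | nil =>
    obtain ⟨m, hm, hinf⟩ := h
    refine ⟨m, hm, ?_⟩
    have hnil : m.toList = [] := List.eq_nil_of_infix_nil hinf
    simp [cutIdx, hnil]
  | cons c rest ih =>
    by_cases hmatch : (ms.any fun m => PySem.Chars.startswith (c :: rest) m.toList) = true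
    · rw [cutIdx, if_pos hmatch, List.drop_zero]
      obtain ⟨m, hm, hs⟩ := List.any_eq_true.1 hmatch
      exact ⟨m, hm, (PySem.Chars.startswith_iff _ _).1 hs⟩
    · rw [cutIdx, if_neg hmatch, List.drop_succ_cons]
      apply ih
      obtain ⟨m, hm, hinf⟩ := h
      rcases List.infix_cons_iff.1 hinf with hpre | hinf'
      · exact absurd (List.any_eq_true.2 ⟨m, hm, (PySem.Chars.startswith_iff _ _).2 hpre⟩) hmatch
      · exact ⟨m, hm, hinf'⟩

-- if no marker occurs in cs, cutIdx is the whole length (B keeps the line)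
lemma cutIdx_eq_len (ms : List String) (cs : List Char)
    (h : ∀ m ∈ ms, ¬ m.toList <:+: cs) :
    cutIdx ms cs = cs.length := by
  induction cs with
  | nil => simp [cutIdx]
  | cons c rest ih =>
    have hmatch : (ms.any fun m => PySem.Chars.startswith (c :: rest) m.toList) = false := by
      rw [List.any_eq_false]
      intro m hm hs
      exact h m hm ((PySem.Chars.startswith_iff _ _).1 hs).isInfix
    rw [cutIdx, if_neg (by simp [hmatch]), List.length_cons]
    rw [ih]
    intro m hm hinf
    exact h m hm (List.infix_cons hinf)

-- the per-line value of A equals the per-line value of B (before rstrip)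
lemma line_eq (ms : List String) (i : String) :
    (match PySem.List.min? (ms.foldl (fun inx j =>
        if PySem.Str.isIn j i then inx ++ [PySem.Str.find i j] else inx) []) (fun v => v) with
      | some v => PySem.Str.slice i none (some v)
      | none   => i)
    = String.ofList (i.toList.take (cutIdx ms i.toList)) := by
  rw [PySem.List.foldl_append_if (fun j => PySem.Str.isIn j i) (fun j => PySem.Str.find i j) ms []]
  rw [List.nil_append]
  rcases hmin : PySem.List.min? ((ms.filter (fun j => PySem.Str.isIn j i)).map
      (fun j => PySem.Str.find i j)) (fun v => v) with _ | v
  · -- inx empty: no marker occurs in the line, A keeps it, cutIdx = length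
    have hempty := (PySem.List.min?_eq_none_iff _ _).1 hmin
    have hno : ∀ m ∈ ms, ¬ m.toList <:+: i.toList := by
      intro m hm hinf
      have hin : PySem.Str.isIn m i = true := by
        rw [PySem.Str.isIn_iff_infix]; exact hinf
      have hmem : PySem.Str.find i m ∈ (ms.filter (fun j => PySem.Str.isIn j i)).map
          (fun j => PySem.Str.find i j) :=
        List.mem_map_of_mem (List.mem_filter.2 ⟨hm, hin⟩)
      rw [hempty] at hmem
      exact absurd hmem (List.not_mem_nil)
    show i = String.ofList (i.toList.take (cutIdx ms i.toList))
    rw [cutIdx_eq_len ms i.toList hno, List.take_length]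
    simp
  · -- inx nonempty: its minimum v is exactly cutIdx
    have hvmem := PySem.List.min?_mem hmin
    obtain ⟨j0, hj0f, hj0v⟩ := List.mem_map.1 hvmem
    obtain ⟨hj0, hj0in⟩ := List.mem_filter.1 hj0f
    have hfind0 : v = PySem.Chars.find i.toList j0.toList := by
      rw [← hj0v]; simp
    have hinf0 : j0.toList <:+: i.toList := by
      rw [PySem.Str.isIn_iff_infix] at hj0in; exact hj0in
    have hv0 : 0 ≤ v := by
      rw [hfind0]; exact (PySem.Chars.find_nonneg_iff _ _).2 hinf0
    have hspec := PySem.Chars.find_spec (s := i.toList) (sub := j0.toList) (hfind0 ▸ hv0)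
    rw [← hfind0] at hspec
    -- cutIdx ≤ v.toNat: a marker (j0) starts at v.toNat, nothing starts before cutIdx
    have hNle : cutIdx ms i.toList ≤ v.toNat := by
      by_contra hlt
      exact cutIdx_min ms i.toList v.toNat (by omega) j0 hj0 hspec.1
    -- v.toNat ≤ cutIdx: some marker m starts at cutIdx, so find i m ≤ cutIdx, and v ≤ find i m
    have hleN : v.toNat ≤ cutIdx ms i.toList := by
      obtain ⟨m, hm, hpre⟩ := cutIdx_match ms i.toList ⟨j0, hj0, hinf0⟩
      have hmin_le : v ≤ PySem.Str.find i m := by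
        apply PySem.List.min?_isMin hmin
        apply List.mem_map_of_mem
        apply List.mem_filter.2
        refine ⟨hm, ?_⟩
        rw [PySem.Str.isIn_iff_infix, ← PySem.Chars.isIn_iff_infix]
        exact (PySem.Chars.exists_prefix_drop_iff_isIn m.toList i.toList).1
          ⟨cutIdx ms i.toList, hpre⟩
      have hfm0 : 0 ≤ PySem.Chars.find i.toList m.toList := by
        apply (PySem.Chars.find_nonneg_iff _ _).2
        rw [← PySem.Chars.isIn_iff_infix]
        exact (PySem.Chars.exists_prefix_drop_iff_isIn m.toList i.toList).1
          ⟨cutIdx ms i.toList, hpre⟩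
      have hspecm := PySem.Chars.find_spec (s := i.toList) (sub := m.toList) hfm0
      have hfmN : (PySem.Chars.find i.toList m.toList).toNat ≤ cutIdx ms i.toList := by
        by_contra hlt
        exact hspecm.2 (cutIdx ms i.toList) (by omega) hpre
      have hfeq : PySem.Str.find i m = PySem.Chars.find i.toList m.toList := by simp
      rw [hfeq] at hmin_le
      omega
    -- both sides are the first cutIdx characters of the line
    have htl : (PySem.Str.slice i none (some v)).toList
        = i.toList.take (cutIdx ms i.toList) := by
      rw [PySem.Str.toList_slice, PySem.Chars.slice_eq_listSlice, PySem.List.slice_to _ hv0]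
      congr 1
      omega
    have hs : ∀ s : String, String.ofList s.toList = s := fun s => by simp
    show PySem.Str.slice i none (some v) = String.ofList (i.toList.take (cutIdx ms i.toList))
    rw [← hs (PySem.Str.slice i none (some v)), htl]

-- ===== VERDICT (by name: the statement is the Claim_ definition above) =====
set_option maxHeartbeats 1000000 in
theorem solution_spec : Claim_equal_solution := by
  intro string markers _
  simp only [Spec_solution, solution, solution_alt]
  rw [PySem.List.foldl_append_singleton_eq_map, PySem.List.foldl_append_singleton_eq_map]
  rw [List.nil_append, List.nil_append, List.map_map]
  refine congrArg (PySem.Str.join "\n") ?_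
  apply List.map_congr_left
  intro i _
  simp only [Function.comp]
  rw [line_eq markers i]
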